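-- pv_equiv track=rewrite | github.com/ZhudejunAI/Road_to_SiliconVallay | 算法题目编程/problem_67.py | get_point_number
-- ===== SOURCE A (Python) =====
-- def get_point_number(a):
--     length = len(a)
--     result = []
--     flag = [0] * length
--     first_max = a[0]
--     for i in range(0, length):
--         if a[i] >= first_max:
--             first_max = a[i]
--             flag[i] = 1
--     second_min = a[-1]
--     for i in range(length - 1, -1, -1):
--         if a[i] <= second_min:
--             second_min = a[i]
--             if flag[i] == 1:
--                 result.append(i)
--
--     return result
-- ===== SOURCE B (Python) =====
-- def get_point_number(a):
--     # Monotonic-stack, single forward pass: the stack holds (index, value)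
--     # candidates that are prefix-maxima and not yet invalidated by a smaller
--     # later element; survivors are exactly the wanted points.
--     stack = []
--     mx = None
--     for i, x in enumerate(a):
--         while stack and stack[-1][1] > x:
--             stack.pop()
--         if mx is None or x >= mx:
--             stack.append((i, x))
--         if mx is None or x > mx:
--             mx = x
--     return [i for i, _ in reversed(stack)]
-- ===== Notes on version B (the rewrite author's own statement) =====
-- stated objective: alternative
-- what changed: A makes two index passes (a forward pass filling a flag array of prefix-max marks, then a backward pass with a running minimum that filters and emits); B is a single forward pass with a monotonic stack of (index,value) candidates, popping candidates invalidated by a smaller later element, and returns the surviving stack reversed.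
import Mathlib
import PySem

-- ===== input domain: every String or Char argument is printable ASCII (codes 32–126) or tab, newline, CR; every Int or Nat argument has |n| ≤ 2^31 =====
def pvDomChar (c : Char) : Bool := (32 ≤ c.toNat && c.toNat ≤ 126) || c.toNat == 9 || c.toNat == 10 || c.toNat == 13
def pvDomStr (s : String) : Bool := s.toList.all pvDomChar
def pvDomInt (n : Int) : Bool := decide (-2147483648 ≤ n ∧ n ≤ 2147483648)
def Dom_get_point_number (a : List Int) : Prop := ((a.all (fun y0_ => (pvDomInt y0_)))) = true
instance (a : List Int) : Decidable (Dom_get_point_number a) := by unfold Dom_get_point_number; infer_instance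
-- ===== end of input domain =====

-- B replaces A's two index passes (flag array + backward running-min filter) by a single
-- forward monotonic-stack pass (objective: alternative algorithm, same O(n) cost).

-- ===== PORT A =====
-- first loop: running first_max, flag[i] = 1 where a[i] >= first_max (emitted in order,
-- default 0 — same values as A's preallocated [0]*length updated in place)
def flagLoop : Int → List Int → List Int
  | _, [] => []
  | fm, x :: xs => if x ≥ fm then 1 :: flagLoop x xs else 0 :: flagLoop fm xs

-- second loop: i from length-1 down to 0 = the enumerated (i, a[i], flag[i]) triples reversed;
-- state second_min, result appended in loop order
def loop2 : Int → List (Int × Int × Int) → List Int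
  | _, [] => []
  | sm, (i, x, f) :: rest =>
      if x ≤ sm then
        (if f = 1 then i :: loop2 x rest else loop2 x rest)
      else loop2 sm rest

def get_point_number (a : List Int) : List Int :=
  match a with
  | [] => []          -- Python: a[0] raises IndexError here; excluded by Pre_
  | x0 :: _ =>
      let flag := flagLoop x0 a
      let triples := (PySem.List.enumerate (List.zip a flag) 0).reverse
      match a.reverse with          -- second_min = a[-1] (the last element; a is nonempty)
      | [] => []
      | y :: _ => loop2 y triples

-- ===== PORT B =====
-- The Python stack (top at the END of the list) is represented top-first: Lean's head is
-- Python's stack[-1]; append = cons, pop = tail, reversed(stack) = this list in order.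
-- inner 'while stack and stack[-1][1] > x: stack.pop()'
def popLoop (x : Int) : List (Int × Int) → List (Int × Int)
  | [] => []
  | p :: s => if p.2 > x then popLoop x s else p :: s

-- the 'for i, x in enumerate(a)' loop, carrying (stack, mx)
def loopB : List (Int × Int) → Option Int → List (Int × Int) → List (Int × Int)
  | s, _, [] => s
  | s, mx, (i, x) :: rest =>
      let s' := popLoop x s
      let s'' := match mx with
        | none => (i, x) :: s'
        | some m => if x ≥ m then (i, x) :: s' else s'
      let mx' := match mx with
        | none => some x
        | some m => if x > m then some x else some m
      loopB s'' mx' rest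

def get_point_number_alt (a : List Int) : List Int :=
  (loopB [] none (PySem.List.enumerate a 0)).map Prod.fst

-- ===== PRECONDITION & SPEC =====
-- Python A evaluates a[0] (IndexError on the empty list), so Pre_ excludes only [].
def Pre_get_point_number (a : List Int) : Prop := a ≠ []
instance (a : List Int) : Decidable (Pre_get_point_number a) := by unfold Pre_get_point_number; infer_instance
def pvWitness_get_point_number : List Int := [1, 2]

def Spec_get_point_number (a : List Int) (out : List Int) : Prop := out = get_point_number_alt a
instance (a : List Int) (out : List Int) : Decidable (Spec_get_point_number a out) := by unfold Spec_get_point_number; infer_instance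

-- ===== CLAIM (what is proved, stated in full; the proofs are below) =====
def Claim_equal_get_point_number : Prop := ∀ (a : List Int), Dom_get_point_number a → Pre_get_point_number a → Spec_get_point_number a (get_point_number a)

-- ===== LEMMAS AND PROOFS =====

-- forward reference filter with running max m: qualifying (index,value) pairs in order
def fwdF : Int → List (Int × Int) → List (Int × Int)
  | _, [] => []
  | m, (i, x) :: rest =>
      (if x ≥ m ∧ (∀ q ∈ rest, x ≤ q.2) then [(i, x)] else []) ++ fwdF (max m x) rest

-- forward reading of A's backward loop: flag and running-min threshold sm
def fwd2 : Int → List (Int × Int × Int) → List Int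
  | _, [] => []
  | sm, (i, x, f) :: rest =>
      (if f = 1 ∧ x ≤ sm ∧ (∀ q ∈ rest, x ≤ q.2.1) then [i] else []) ++ fwd2 sm rest

-- same with the sm condition dropped (sm = last value makes it redundant)
def fwd3 : List (Int × Int × Int) → List Int
  | [] => []
  | (i, x, f) :: rest =>
      (if f = 1 ∧ (∀ q ∈ rest, x ≤ q.2.1) then [i] else []) ++ fwd3 rest

theorem loop2_step (sm i x f : Int) (rest : List (Int × Int × Int)) :
    loop2 sm ((i, x, f) :: rest)
      = (if x ≤ sm ∧ f = 1 then [i] else []) ++ loop2 (min sm x) rest := by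
  simp only [loop2]
  by_cases h : x ≤ sm
  · have : min sm x = x := by omega
    rw [this]
    by_cases hf : f = 1 <;> simp [h, hf]
  · have : min sm x = sm := by omega
    rw [this]
    simp [h]

theorem fwd2_append_last (sm i x f : Int) (N : List (Int × Int × Int)) :
    fwd2 sm (N ++ [(i, x, f)])
      = fwd2 (min sm x) N ++ (if x ≤ sm ∧ f = 1 then [i] else []) := by
  induction N generalizing sm with
  | nil =>
      simp only [List.nil_append, fwd2]
      by_cases h : x ≤ sm <;> by_cases hf : f = 1 <;> simp [h, hf]
  | cons t N' ih =>
      obtain ⟨j, z, g⟩ := t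
      simp only [List.cons_append, fwd2, ih]
      have hcond : (g = 1 ∧ z ≤ sm ∧ (∀ q ∈ N' ++ [(i, x, f)], z ≤ q.2.1))
          ↔ (g = 1 ∧ z ≤ min sm x ∧ (∀ q ∈ N', z ≤ q.2.1)) := by
        constructor
        · rintro ⟨hg, hz, hall⟩
          refine ⟨hg, ?_, fun q hq => hall q (by simp [hq])⟩
          have := hall (i, x, f) (by simp)
          simp at this; omega
        · rintro ⟨hg, hz, hall⟩
          refine ⟨hg, by omega, fun q hq => ?_⟩
          rcases List.mem_append.mp hq with h1 | h1
          · exact hall q h1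
          · simp at h1; subst h1; simpa using (by omega : z ≤ x)
      by_cases h : g = 1 ∧ z ≤ min sm x ∧ (∀ q ∈ N', z ≤ q.2.1)
      · rw [if_pos (hcond.mpr h), if_pos h]; simp
      · rw [if_neg (fun hh => h (hcond.mp hh)), if_neg h]; simp

theorem loop2_eq_fwd2 (L : List (Int × Int × Int)) : ∀ sm : Int,
    loop2 sm L = (fwd2 sm L.reverse).reverse := by
  induction L with
  | nil => intro sm; rfl
  | cons t L' ih =>
      obtain ⟨i, x, f⟩ := t
      intro sm
      rw [loop2_step, ih (min sm x)]
      simp only [List.reverse_cons, fwd2_append_last, List.reverse_append]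
      by_cases h : x ≤ sm ∧ f = 1 <;> simp [h]

theorem fwd2_eq_fwd3 (M : List (Int × Int × Int)) : ∀ (sm : Int) (t : Int × Int × Int),
    M.getLast? = some t → t.2.1 = sm → fwd2 sm M = fwd3 M := by
  induction M with
  | nil => intro sm t h; simp at h
  | cons u M' ih =>
      intro sm t hlast hval
      obtain ⟨i, x, f⟩ := u
      cases M' with
      | nil =>
          rw [List.getLast?_singleton, Option.some.injEq] at hlast
          subst hlast
          simp only [fwd2, fwd3]
          have : x = sm := hval
          subst this
          simp
      | cons v M'' =>
          rw [List.getLast?_cons_cons] at hlast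
          have htm : t ∈ v :: M'' := List.mem_of_getLast? hlast
          have hrec : fwd2 sm (v :: M'') = fwd3 (v :: M'') := ih sm t hlast hval
          rw [show fwd2 sm ((i, x, f) :: v :: M'')
              = (if f = 1 ∧ x ≤ sm ∧ (∀ q ∈ v :: M'', x ≤ q.2.1) then [i] else [])
                ++ fwd2 sm (v :: M'') from rfl,
            show fwd3 ((i, x, f) :: v :: M'')
              = (if f = 1 ∧ (∀ q ∈ v :: M'', x ≤ q.2.1) then [i] else [])
                ++ fwd3 (v :: M'') from rfl, hrec]
          have hiff : (f = 1 ∧ x ≤ sm ∧ (∀ q ∈ v :: M'', x ≤ q.2.1))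
              ↔ (f = 1 ∧ (∀ q ∈ v :: M'', x ≤ q.2.1)) := by
            constructor
            · rintro ⟨h1, _, h3⟩; exact ⟨h1, h3⟩
            · rintro ⟨h1, h3⟩
              refine ⟨h1, ?_, h3⟩
              have := h3 t htm; omega
          rw [if_congr hiff rfl rfl]

theorem length_flagLoop (m : Int) (a : List Int) : (flagLoop m a).length = a.length := by
  induction a generalizing m with
  | nil => rfl
  | cons x t ih => by_cases h : x ≥ m <;> simp [flagLoop, h, ih]

-- value membership through enumerate ∘ zip
theorem all_enum_zip (t fl : List Int) (k x : Int) (hlen : fl.length = t.length) :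
    (∀ q ∈ PySem.List.enumerate (t.zip fl) k, x ≤ q.2.1) ↔ (∀ v ∈ t, x ≤ v) := by
  constructor
  · intro h v hv
    obtain ⟨n, hn, hget⟩ := List.getElem_of_mem hv
    have hmem : ((k + n : Int), (v, fl[n]'(by omega))) ∈ PySem.List.enumerate (t.zip fl) k := by
      rw [PySem.List.mem_enumerate_iff]
      exact ⟨n, by simp [hlen]; omega, by simp [List.getElem_zip, hget]⟩
    exact h _ hmem
  · intro h q hq
    rw [PySem.List.mem_enumerate_iff] at hq
    obtain ⟨n, hn, rfl⟩ := hq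
    have hn' : n < t.length := by simp [hlen] at hn; omega
    simp only [List.getElem_zip]
    exact h _ (List.getElem_mem hn')

theorem all_enum (t : List Int) (k x : Int) :
    (∀ q ∈ PySem.List.enumerate t k, x ≤ q.2) ↔ (∀ v ∈ t, x ≤ v) := by
  constructor
  · intro h v hv
    obtain ⟨n, hn, hget⟩ := List.getElem_of_mem hv
    have : ((k + n : Int), v) ∈ PySem.List.enumerate t k := by
      rw [PySem.List.mem_enumerate_iff]; exact ⟨n, hn, by simp [hget]⟩
    exact h _ this
  · intro h q hq
    rw [PySem.List.mem_enumerate_iff] at hq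
    obtain ⟨n, hn, rfl⟩ := hq
    exact h _ (List.getElem_mem hn)

theorem fwd3_enum (a : List Int) : ∀ (m : Int) (k : Int),
    fwd3 (PySem.List.enumerate (a.zip (flagLoop m a)) k)
      = (fwdF m (PySem.List.enumerate a k)).map Prod.fst := by
  induction a with
  | nil => intro m k; rfl
  | cons x t ih =>
      intro m k
      by_cases h : x ≥ m
      · simp only [flagLoop, if_pos h, List.zip_cons_cons, PySem.List.enumerate_cons, fwd3, fwdF]
        have hmax : max m x = x := by omega
        rw [hmax, ih x (k + 1)]
        by_cases hlow : (∀ q ∈ PySem.List.enumerate t (k + 1), x ≤ q.2)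
        · have hlow' : (∀ q ∈ PySem.List.enumerate (t.zip (flagLoop x t)) (k + 1), x ≤ q.2.1) :=
            (all_enum_zip t _ _ _ (length_flagLoop x t)).mpr ((all_enum t (k + 1) x).mp hlow)
          rw [if_pos ⟨trivial, hlow'⟩, if_pos ⟨h, hlow⟩]
          simp
        · have hlow' : ¬ (∀ q ∈ PySem.List.enumerate (t.zip (flagLoop x t)) (k + 1), x ≤ q.2.1) :=
            fun hh => hlow ((all_enum t (k + 1) x).mpr
              ((all_enum_zip t _ _ _ (length_flagLoop x t)).mp hh))
          rw [if_neg (fun hh => hlow' hh.2), if_neg (fun hh => hlow hh.2)]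
          simp
      · simp only [flagLoop, if_neg h, List.zip_cons_cons, PySem.List.enumerate_cons, fwd3, fwdF]
        have hmax : max m x = m := by omega
        rw [hmax, ih m (k + 1)]
        have h0' : ¬ (x ≥ m ∧ (∀ q ∈ PySem.List.enumerate t (k + 1), x ≤ q.2)) := by
          rintro ⟨hge, -⟩; exact h hge
        rw [if_neg h0']
        have h00 : ¬ ((0 : Int) = 1 ∧ (∀ q ∈ PySem.List.enumerate (t.zip (flagLoop m t)) (k + 1), x ≤ q.2.1)) := by
          rintro ⟨h01, -⟩; exact absurd h01 (by norm_num)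
        rw [if_neg h00]
        simp

-- last-element bookkeeping
theorem getLast?_snd_enumerate {α : Type} (xs : List α) : ∀ k : Int,
    ((PySem.List.enumerate xs k).getLast?).map Prod.snd = xs.getLast? := by
  induction xs with
  | nil => intro k; rfl
  | cons u t ih =>
      intro k
      cases t with
      | nil => simp [PySem.List.enumerate_cons, PySem.List.enumerate_nil]
      | cons v t' =>
          rw [PySem.List.enumerate_cons, PySem.List.enumerate_cons, List.getLast?_cons_cons,
            ← PySem.List.enumerate_cons, ih (k + 1), List.getLast?_cons_cons]

theorem getLast?_fst_zip (a : List Int) : ∀ fl : List Int, fl.length = a.length →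
    ((a.zip fl).getLast?).map Prod.fst = a.getLast? := by
  induction a with
  | nil => intro fl h; rfl
  | cons x t ih =>
      intro fl h
      cases fl with
      | nil => simp at h
      | cons g gs =>
          simp only [List.length_cons] at h
          cases t with
          | nil =>
              cases gs with
              | nil => simp
              | cons _ _ => simp at h
          | cons y t' =>
              cases gs with
              | nil => simp at h
              | cons g' gs' =>
                  rw [List.zip_cons_cons, List.zip_cons_cons, List.getLast?_cons_cons,
                    ← List.zip_cons_cons, List.getLast?_cons_cons]
                  exact ih (g' :: gs') (by simpa using h)

-- ===== stack side =====

theorem popLoop_eq_filter (x : Int) (s : List (Int × Int)) (hs : s.Pairwise (fun p q => q.2 ≤ p.2)) :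
    popLoop x s = s.filter (fun p => decide (p.2 ≤ x)) := by
  induction s with
  | nil => rfl
  | cons p s' ih =>
      rw [List.pairwise_cons] at hs
      simp only [popLoop]
      by_cases h : p.2 > x
      · rw [if_pos h, ih hs.2, List.filter_cons, if_neg (by simp; omega)]
      · rw [if_neg h, List.filter_cons, if_pos (by simp; omega),
          List.filter_eq_self.mpr (fun q hq => by have := hs.1 q hq; simp; omega)]

-- merging the pop-filter with the survives-the-rest filter
theorem filter_filter_cons (i x : Int) (rest s : List (Int × Int)) :
    (s.filter (fun p => decide (p.2 ≤ x))).filter (fun p => decide (∀ q ∈ rest, p.2 ≤ q.2))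
      = s.filter (fun p => decide (∀ q ∈ (i, x) :: rest, p.2 ≤ q.2)) := by
  rw [List.filter_filter]
  apply List.filter_congr
  intro p _
  simp only [List.mem_cons, forall_eq_or_imp]
  simp [Bool.decide_and, Bool.and_comm]

theorem loopB_spec (ys : List (Int × Int)) : ∀ (s : List (Int × Int)) (m : Int),
    s.Pairwise (fun p q => q.2 ≤ p.2) → (∀ p ∈ s, p.2 ≤ m) →
    loopB s (some m) ys
      = (fwdF m ys).reverse ++ s.filter (fun p => decide (∀ q ∈ ys, p.2 ≤ q.2)) := by
  induction ys with
  | nil =>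
      intro s m _ _
      simp only [loopB, fwdF, List.reverse_nil, List.nil_append]
      rw [List.filter_eq_self.mpr (fun q _ => by simp)]
  | cons t rest ih =>
      rintro s m hsort hle
      obtain ⟨i, x⟩ := t
      simp only [loopB, popLoop_eq_filter x s hsort]
      by_cases hx : x ≥ m
      · rw [if_pos hx]
        have hsort' : ((i, x) :: s.filter (fun p => decide (p.2 ≤ x))).Pairwise (fun p q => q.2 ≤ p.2) := by
          rw [List.pairwise_cons]
          exact ⟨fun q hq => by have := (List.mem_filter.mp hq).2; simp at this; exact this,
            hsort.filter _⟩
        have hle' : ∀ p ∈ (i, x) :: s.filter (fun p => decide (p.2 ≤ x)), p.2 ≤ (if x > m then x else m) := by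
          intro p hp
          rcases List.mem_cons.mp hp with rfl | hp'
          · simp; omega
          · have := (List.mem_filter.mp hp').2; simp at this; split <;> omega
        have hmx : (if x > m then some x else some m) = some (if x > m then x else m) := by
          split <;> rfl
        rw [hmx, ih _ _ hsort' hle']
        have hmaxeq : (if x > m then x else m) = max m x := by omega
        rw [hmaxeq]
        simp only [fwdF, List.reverse_append]
        rw [List.append_assoc]
        congr 1
        by_cases hlow : (∀ q ∈ rest, x ≤ q.2)
        · rw [if_pos ⟨hx, hlow⟩]
          simp only [List.filter_cons]
          rw [if_pos (by simpa using hlow)]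
          simp only [List.reverse_cons, List.reverse_nil, List.nil_append, List.cons_append]
          congr 1
          exact filter_filter_cons i x rest s
        · rw [if_neg (fun hh => hlow hh.2)]
          simp only [List.filter_cons]
          rw [if_neg (by simpa using hlow)]
          simp only [List.reverse_nil, List.nil_append]
          exact filter_filter_cons i x rest s
      · rw [if_neg hx]
        have hsort' := hsort.filter (fun p => decide (p.2 ≤ x))
        have hle' : ∀ p ∈ s.filter (fun p => decide (p.2 ≤ x)), p.2 ≤ (if x > m then x else m) := by
          intro p hp
          have := (List.mem_filter.mp hp).2; simp at this; split <;> omega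
        have hmx : (if x > m then some x else some m) = some (if x > m then x else m) := by
          split <;> rfl
        rw [hmx, ih _ _ hsort' hle']
        have hmaxeq : (if x > m then x else m) = max m x := by omega
        rw [hmaxeq]
        simp only [fwdF]
        rw [if_neg (fun hh => hx hh.1)]
        simp only [List.nil_append]
        congr 1
        exact filter_filter_cons i x rest s

-- assemble B's side: loopB from the empty stack computes the reversed fwdF list
theorem altEq (x0 : Int) (t : List Int) :
    get_point_number_alt (x0 :: t)
      = ((fwdF x0 (PySem.List.enumerate (x0 :: t) 0)).map Prod.fst).reverse := by
  simp only [get_point_number_alt, PySem.List.enumerate_cons, loopB, popLoop]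
  rw [loopB_spec (PySem.List.enumerate t (0 + 1)) [(0, x0)] x0 (by simp) (by simp)]
  simp only [fwdF]
  have hge : x0 ≥ x0 := le_refl x0
  by_cases hlow : (∀ q ∈ PySem.List.enumerate t (0 + 1), x0 ≤ q.2)
  · rw [if_pos ⟨hge, hlow⟩]
    simp only [List.filter_cons, List.filter_nil]
    rw [if_pos (by simpa using hlow)]
    simp [List.map_reverse]
  · rw [if_neg (fun hh => hlow hh.2)]
    simp only [List.filter_cons, List.filter_nil]
    rw [if_neg (by simpa using hlow)]
    simp [List.map_reverse]

theorem main_eq (x0 : Int) (t : List Int) :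
    get_point_number (x0 :: t) = get_point_number_alt (x0 :: t) := by
  obtain ⟨y, ys, hrev⟩ : ∃ y ys, (x0 :: t).reverse = y :: ys := by
    cases h : (x0 :: t).reverse with
    | nil => exact absurd h (by simp)
    | cons y ys => exact ⟨y, ys, rfl⟩
  have hlastA : (x0 :: t).getLast? = some y := by
    rw [← List.head?_reverse, hrev]; rfl
  simp only [get_point_number, hrev]
  rw [loop2_eq_fwd2, List.reverse_reverse]
  -- the last triple's value component is y
  have hlenf : (flagLoop x0 (x0 :: t)).length = (x0 :: t).length := length_flagLoop x0 (x0 :: t)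
  have hz : (((x0 :: t).zip (flagLoop x0 (x0 :: t))).getLast?).map Prod.fst = some y := by
    rw [getLast?_fst_zip _ _ hlenf, hlastA]
  obtain ⟨tl, htl, htlv⟩ : ∃ tl, ((x0 :: t).zip (flagLoop x0 (x0 :: t))).getLast? = some tl ∧ tl.1 = y := by
    cases h : ((x0 :: t).zip (flagLoop x0 (x0 :: t))).getLast? with
    | none => rw [h] at hz; simp at hz
    | some tl => rw [h] at hz; simp at hz; exact ⟨tl, rfl, hz⟩
  obtain ⟨te, hte, htev⟩ : ∃ te : Int × Int × Int,
      (PySem.List.enumerate ((x0 :: t).zip (flagLoop x0 (x0 :: t))) 0).getLast? = some te ∧ te.2.1 = y := by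
    have := getLast?_snd_enumerate ((x0 :: t).zip (flagLoop x0 (x0 :: t))) 0
    rw [htl] at this
    cases h : (PySem.List.enumerate ((x0 :: t).zip (flagLoop x0 (x0 :: t))) 0).getLast? with
    | none => rw [h] at this; simp at this
    | some te =>
        rw [h] at this; simp at this
        exact ⟨te, rfl, by rw [this, htlv]⟩
  rw [fwd2_eq_fwd3 _ y te hte htev, fwd3_enum (x0 :: t) x0 0, altEq]

-- ===== VERDICT (by name: the statement is the Claim_ definition above) =====
theorem get_point_number_spec : Claim_equal_get_point_number := by
  intro a _ hpre
  unfold Spec_get_point_number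
  cases a with
  | nil => exact absurd rfl hpre
  | cons x0 t => exact main_eq x0 t
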